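-- pv_equiv track=rewrite | github.com/sarahgin/BiofilmMorphologyAI | ComputationalBiology/data_analysis/gene_features_calculator.py | compute_all_kmer_positions
-- ===== SOURCE A (Python) =====
-- def compute_all_kmer_positions(sequence: str, k: int,
--                                sliding_window=1, start_position=0):
--     result = {}
--     for pos in range(start_position, len(sequence) - k + 1, sliding_window):
--         current_kmer = sequence[pos: pos + k]
--         if current_kmer in result.keys():
--             result[current_kmer].append(pos)
--         else:
--             result[current_kmer] = [pos]
--
--     return result
-- ===== SOURCE B (Python) =====
-- def compute_all_kmer_positions(sequence: str, k: int,
--                                sliding_window=1, start_position=0):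
--     # index-then-group: materialise all (kmer, pos) pairs, dedup kmers in
--     # first-occurrence order, then collect each kmer's positions by filtering.
--     pairs = [(sequence[pos: pos + k], pos)
--              for pos in range(start_position, len(sequence) - k + 1, sliding_window)]
--     order = dict.fromkeys(kmer for kmer, _ in pairs)
--     return {km: [p for s, p in pairs if s == km] for km in order}
-- ===== Notes on version B (the rewrite author's own statement) =====
-- stated objective: alternative
-- what changed: Replaces the single-pass dict insert-or-append with an index-then-group pass: build all (kmer, pos) pairs, dedup kmers in first-occurrence order with dict.fromkeys, then collect each kmer's positions by a per-kmer filter over the pairs.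
import Mathlib
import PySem

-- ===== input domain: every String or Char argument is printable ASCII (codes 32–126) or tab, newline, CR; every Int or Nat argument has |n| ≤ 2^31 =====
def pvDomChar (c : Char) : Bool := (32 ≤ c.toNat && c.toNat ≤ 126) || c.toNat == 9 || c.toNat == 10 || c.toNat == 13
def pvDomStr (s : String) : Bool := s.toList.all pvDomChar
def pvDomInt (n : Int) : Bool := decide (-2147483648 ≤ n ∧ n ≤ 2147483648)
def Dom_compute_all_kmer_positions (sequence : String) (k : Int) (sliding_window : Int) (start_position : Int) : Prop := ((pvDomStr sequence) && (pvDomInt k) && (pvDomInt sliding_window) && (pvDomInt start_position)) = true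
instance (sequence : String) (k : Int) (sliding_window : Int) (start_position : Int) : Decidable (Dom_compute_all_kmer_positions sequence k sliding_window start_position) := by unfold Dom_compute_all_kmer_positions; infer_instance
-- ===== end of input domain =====

-- B groups the k-mer positions by an index-then-group pass (pairs, ordered dedup, per-kmer filter)
-- instead of A's single-pass dict insert-or-append; return values proved equal whenever sliding_window ≠ 0.

-- ===== PORT A =====
def compute_all_kmer_positions (sequence : String) (k : Int) (sliding_window : Int) (start_position : Int) : List (String × List Int) :=
  let result : PySem.Dict String (List Int) :=
    (PySem.List.pyRange start_position (PySem.Str.len sequence - k + 1) sliding_window).foldl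
      (fun result pos =>
        let current_kmer := PySem.Str.slice sequence (some pos) (some (pos + k))
        if result.contains current_kmer then
          -- result[current_kmer].append(pos): key is present, so modify with default [] is exact
          result.modify current_kmer [] (fun l => l ++ [pos])
        else
          result.insert current_kmer [pos])
      PySem.Dict.empty
  result.items

-- ===== PORT B =====
def compute_all_kmer_positions_alt (sequence : String) (k : Int) (sliding_window : Int) (start_position : Int) : List (String × List Int) :=
  let pairs : List (String × Int) :=
    (PySem.List.pyRange start_position (PySem.Str.len sequence - k + 1) sliding_window).map
      (fun pos => (PySem.Str.slice sequence (some pos) (some (pos + k)), pos))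
  let order := PySem.List.dedup (pairs.map (·.1))   -- dict.fromkeys: first occurrences, in order
  order.map (fun km => (km, (pairs.filter (fun q => q.1 == km)).map (·.2)))

-- ===== PRECONDITION & SPEC =====
-- Pre_ excludes exactly sliding_window = 0, on which A's range(...) raises ValueError.
def Pre_compute_all_kmer_positions (sequence : String) (k : Int) (sliding_window : Int) (start_position : Int) : Prop := sliding_window ≠ 0
instance (sequence : String) (k : Int) (sliding_window : Int) (start_position : Int) : Decidable (Pre_compute_all_kmer_positions sequence k sliding_window start_position) := by unfold Pre_compute_all_kmer_positions; infer_instance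
def pvWitness_compute_all_kmer_positions : String × Int × Int × Int := ("ABAB", 2, 1, 0)

def Spec_compute_all_kmer_positions (sequence : String) (k : Int) (sliding_window : Int) (start_position : Int) (out : List (String × List Int)) : Prop := out = compute_all_kmer_positions_alt sequence k sliding_window start_position
instance (sequence : String) (k : Int) (sliding_window : Int) (start_position : Int) (out : List (String × List Int)) : Decidable (Spec_compute_all_kmer_positions sequence k sliding_window start_position out) := by unfold Spec_compute_all_kmer_positions; infer_instance

-- ===== CLAIM (what is proved, stated in full; the proofs are below) =====
def Claim_equal_compute_all_kmer_positions : Prop := ∀ (sequence : String) (k : Int) (sliding_window : Int) (start_position : Int), Dom_compute_all_kmer_positions sequence k sliding_window start_position → Pre_compute_all_kmer_positions sequence k sliding_window start_position → Spec_compute_all_kmer_positions sequence k sliding_window start_position (compute_all_kmer_positions sequence k sliding_window start_position)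

-- ===== LEMMAS AND PROOFS =====

-- A's insert-or-append branch is exactly a Dict.modify (append with default []).
theorem step_eq_modify (d : PySem.Dict String (List Int)) (km : String) (pos : Int) :
    (if d.contains km then d.modify km [] (fun l => l ++ [pos]) else d.insert km [pos])
      = d.modify km [] (fun l => l ++ [pos]) := by
  cases h : d.contains km with
  | true => simp
  | false => simp [h, PySem.Dict.modify, PySem.Dict.getD_of_not_contains]

-- ===== VERDICT (by name: the statement is the Claim_ definition above) =====
theorem compute_all_kmer_positions_spec : Claim_equal_compute_all_kmer_positions := by
  intro sequence k sliding_window start_position _ _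
  unfold Spec_compute_all_kmer_positions compute_all_kmer_positions compute_all_kmer_positions_alt
  simp only [step_eq_modify]
  rw [show (PySem.List.pyRange start_position (PySem.Str.len sequence - k + 1) sliding_window).foldl
        (fun result pos => result.modify (PySem.Str.slice sequence (some pos) (some (pos + k))) []
          (fun l => l ++ [pos])) PySem.Dict.empty
      = ((PySem.List.pyRange start_position (PySem.Str.len sequence - k + 1) sliding_window).map
          (fun pos => (PySem.Str.slice sequence (some pos) (some (pos + k)), pos))).foldl
          (fun d (q : String × Int) => d.modify q.1 [] (fun l => l ++ [q.2])) PySem.Dict.empty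
      from by rw [List.foldl_map]]
  set pairs := (PySem.List.pyRange start_position (PySem.Str.len sequence - k + 1) sliding_window).map
      (fun pos => (PySem.Str.slice sequence (some pos) (some (pos + k)), pos)) with hpairs
  set D := pairs.foldl (fun d (q : String × Int) => d.modify q.1 [] (fun l => l ++ [q.2])) PySem.Dict.empty with hD
  have hnd : D.keys.Nodup := by
    rw [hD]
    exact PySem.Dict.nodup_keys_foldl_modify_key pairs Prod.fst []
      (fun d q => fun l => l ++ [q.2]) PySem.Dict.empty PySem.Dict.nodup_keys_empty
  have hkeys : D.keys = PySem.List.dedup (pairs.map (·.1)) := by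
    rw [hD, PySem.Dict.keys_foldl_modify_key, PySem.Dict.keys_empty, PySem.List.dedup_eq_ofList,
      PySem.Set.ofList_eq_foldl]
    rfl
  rw [PySem.Dict.items_eq_map_keys D hnd [], hkeys]
  refine List.map_congr_left (fun km _ => ?_)
  rw [hD, PySem.Dict.getD_foldl_modify_append, PySem.Dict.getD_empty]
  simp
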